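-- pv_equiv track=rewrite | github.com/jimmyeaaaaah/hopdr | hirobe/inlined_trace_analysis.py | get_wf_args
-- ===== SOURCE A (Python) =====
-- def get_wf_args(wf):
--     wf_args = []
--     arg = []
--     paren = 0
--     for term in wf:
--         if term[0].isupper():
--             continue
--         if term == "(":
--             paren+=1
--         elif term == ")":
--             paren-=1
--         arg.append(term)
--         if paren == 0:
--             wf_args.append(arg)
--             arg = []
--     if len(arg) != 0:
--         wf_args.append(arg)
--     return wf_args
-- ===== SOURCE B (Python) =====
-- def get_wf_args(wf):
--     filtered = [t for t in wf if not t[0].isupper()]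
--     deltas = [1 if t == "(" else -1 if t == ")" else 0 for t in filtered]
--     depths = []
--     d = 0
--     for x in deltas:
--         d += x
--         depths.append(d)
--     cuts = [i + 1 for i, dep in enumerate(depths) if dep == 0]
--     groups = [filtered[a:b] for a, b in zip([0] + cuts, cuts)]
--     last = cuts[-1] if cuts else 0
--     if last < len(filtered):
--         groups.append(filtered[last:])
--     return groups
-- ===== Notes on version B (the rewrite author's own statement) =====
-- stated objective: alternative
-- what changed: Replaces A's single fused stateful loop (running arg buffer + paren counter with in-loop flushes) by a pipeline of independent passes: filter out uppercase-led tokens, compute cumulative paren depth, collect the indices where the depth is 0, and slice the filtered list between consecutive zero-depth boundaries (plus a trailing remainder).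
import Mathlib
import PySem

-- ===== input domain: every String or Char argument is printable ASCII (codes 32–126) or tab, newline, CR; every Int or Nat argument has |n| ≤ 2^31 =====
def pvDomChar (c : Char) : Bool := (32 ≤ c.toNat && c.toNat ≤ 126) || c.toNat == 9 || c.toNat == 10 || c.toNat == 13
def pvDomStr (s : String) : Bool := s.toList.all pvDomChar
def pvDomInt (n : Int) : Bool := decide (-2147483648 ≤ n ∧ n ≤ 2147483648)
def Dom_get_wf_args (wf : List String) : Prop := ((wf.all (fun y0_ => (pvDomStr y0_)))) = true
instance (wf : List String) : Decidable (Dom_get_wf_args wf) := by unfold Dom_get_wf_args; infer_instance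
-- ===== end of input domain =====

-- B replaces A's fused stateful loop by filter / cumulative-depth / slice-at-zero-boundaries passes (alternative decomposition, same cost).


-- ===== PORT A =====
-- term[0].isupper(): the 'none' branch (empty token, Python IndexError) is excluded by Pre_.
def pvUpperFirst (t : String) : Bool :=
  match PySem.Str.pyGet? t 0 with
  | some c => PySem.Chars.isupper c
  | none => false

def pvStepA (st : List (List String) × List String × Int) (term : String) :
    List (List String) × List String × Int :=
  if pvUpperFirst term then st
  else
    let paren : Int := if term = "(" then st.2.2 + 1 else if term = ")" then st.2.2 - 1 else st.2.2
    let arg := st.2.1 ++ [term]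
    if paren = 0 then (st.1 ++ [arg], [], paren) else (st.1, arg, paren)

def get_wf_args (wf : List String) : List (List String) :=
  let st := wf.foldl pvStepA ([], [], 0)
  if st.2.1.length ≠ 0 then st.1 ++ [st.2.1] else st.1

-- ===== PORT B =====
def pvDelta (t : String) : Int := if t = "(" then 1 else if t = ")" then -1 else 0

-- the pipeline of Source B on the already-filtered token list
def pvPipe (filtered : List String) : List (List String) :=
  let deltas := filtered.map pvDelta
  let depths := (deltas.foldl (fun (st : List Int × Int) x => (st.1 ++ [st.2 + x], st.2 + x)) (([] : List Int), (0 : Int))).1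
  let cuts := (PySem.List.enumerate depths 0).filterMap (fun q => if q.2 = 0 then some (q.1 + 1) else none)
  let groups := (List.zip ((0 : Int) :: cuts) cuts).map (fun q => PySem.List.slice filtered (some q.1) (some q.2))
  let last := match PySem.List.pyGet? cuts (-1) with | some c => c | none => (0 : Int)
  if last < (filtered.length : Int) then groups ++ [PySem.List.slice filtered (some last) none] else groups

def get_wf_args_alt (wf : List String) : List (List String) :=
  pvPipe (wf.filter (fun t => !pvUpperFirst t))

-- ===== PRECONDITION & SPEC =====
-- Pre_ excludes lists containing an empty-string token, on which both A and B raise IndexError at term[0].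
def Pre_get_wf_args (wf : List String) : Prop := ∀ t ∈ wf, t ≠ ""
instance (wf : List String) : Decidable (Pre_get_wf_args wf) := by unfold Pre_get_wf_args; infer_instance
def pvWitness_get_wf_args : List String := ["(", "x", ")", "Foo", "y"]

def Spec_get_wf_args (wf : List String) (out : List (List String)) : Prop := out = get_wf_args_alt wf
instance (wf : List String) (out : List (List String)) : Decidable (Spec_get_wf_args wf out) := by unfold Spec_get_wf_args; infer_instance

-- ===== CLAIM (what is proved, stated in full; the proofs are below) =====
def Claim_equal_get_wf_args : Prop := ∀ (wf : List String), Dom_get_wf_args wf → Pre_get_wf_args wf → Spec_get_wf_args wf (get_wf_args wf)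

-- ===== LEMMAS AND PROOFS =====

-- common recursive specification: the fused grouping recursion
def pvGns (arg : List String) (p : Int) : List String → List (List String)
  | [] => if arg = [] then [] else [arg]
  | t :: rest =>
    if p + pvDelta t = 0 then (arg ++ [t]) :: pvGns [] 0 rest
    else pvGns (arg ++ [t]) (p + pvDelta t) rest

-- cut positions (1-based, as Ints) at which running depth p returns to 0
def pvCuts (p : Int) : List String → List Int
  | [] => []
  | t :: l =>
    if p + pvDelta t = 0 then 1 :: (pvCuts (p + pvDelta t) l).map (· + 1)
    else (pvCuts (p + pvDelta t) l).map (· + 1)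

def pvCumsum (p : Int) : List Int → List Int
  | [] => []
  | x :: xs => (p + x) :: pvCumsum (p + x) xs

def pvCutsAt (s : Int) : List Int → List Int
  | [] => []
  | d :: ds => if d = 0 then (s + 1) :: pvCutsAt (s + 1) ds else pvCutsAt (s + 1) ds

theorem pv_foldl_depths (xs : List Int) : ∀ (acc : List Int) (d : Int),
    (xs.foldl (fun (st : List Int × Int) x => (st.1 ++ [st.2 + x], st.2 + x)) (acc, d)).1
      = acc ++ pvCumsum d xs := by
  induction xs with
  | nil => intro acc d; simp [pvCumsum]
  | cons x xs ih => intro acc d; simp [List.foldl_cons, pvCumsum, ih]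

theorem pv_cuts_enum (ds : List Int) : ∀ (s : Int),
    (PySem.List.enumerate ds s).filterMap (fun q => if q.2 = 0 then some (q.1 + 1) else none)
      = pvCutsAt s ds := by
  induction ds with
  | nil => intro s; simp [PySem.List.enumerate_nil, pvCutsAt]
  | cons d ds ih =>
    intro s
    by_cases h : d = 0 <;> simp [PySem.List.enumerate_cons, pvCutsAt, h, ih]

theorem pv_map_add_add (xs : List Int) (a b : Int) :
    (xs.map (· + a)).map (· + b) = xs.map (· + (a + b)) := by
  rw [List.map_map]; congr 1; funext x; simp [Function.comp]; ring

theorem pv_cutsAt_shift (ds : List Int) : ∀ (s : Int),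
    pvCutsAt s ds = (pvCutsAt 0 ds).map (· + s) := by
  induction ds with
  | nil => intro s; simp [pvCutsAt]
  | cons d ds ih =>
    intro s
    by_cases h : d = 0
    · simp [pvCutsAt, h, ih (s + 1), ih 1]
      exact ⟨by ring, fun a _ => by ring⟩
    · simp [pvCutsAt, h, ih (s + 1), ih 1]
      intro a _
      ring

theorem pv_cutsAt_cumsum (l : List String) : ∀ (p : Int),
    pvCutsAt 0 (pvCumsum p (l.map pvDelta)) = pvCuts p l := by
  induction l with
  | nil => intro p; simp [pvCumsum, pvCutsAt, pvCuts]
  | cons t l ih =>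
    intro p
    simp only [List.map_cons, pvCumsum, pvCutsAt]
    by_cases h : p + pvDelta t = 0
    · simp [pvCuts, h, pv_cutsAt_shift _ 1, ih]
    · simp [pvCuts, h, pv_cutsAt_shift _ 1, ih]

theorem pv_cuts_bound (l : List String) : ∀ (p : Int) (c : Int), c ∈ pvCuts p l →
    1 ≤ c ∧ c ≤ (l.length : Int) := by
  induction l with
  | nil => intro p c hc; simp [pvCuts] at hc
  | cons t l ih =>
    intro p c hc
    simp only [pvCuts] at hc
    by_cases h : p + pvDelta t = 0 <;> simp [h, List.mem_map] at hc
    · rcases hc with rfl | ⟨c', hc', rfl⟩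
      · refine ⟨le_refl 1, ?_⟩
        simp only [List.length_cons, Nat.cast_add, Nat.cast_one]
        omega
      · have := ih _ _ hc'
        simp only [List.length_cons]
        push_cast
        omega
    · rcases hc with ⟨c', hc', rfl⟩
      have := ih _ _ hc'
      simp only [List.length_cons]
      push_cast
      omega

theorem pv_cuts_decomp (l : List String) : ∀ (p c : Int) (cs : List Int),
    pvCuts p l = c :: cs → cs = (pvCuts 0 (l.drop c.toNat)).map (· + c) := by
  induction l with
  | nil => intro p c cs hc; simp [pvCuts] at hc
  | cons t l ih =>
    intro p c cs hc
    simp only [pvCuts] at hc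
    by_cases h : p + pvDelta t = 0
    · rw [if_pos h, h] at hc
      simp only [List.cons.injEq] at hc
      obtain ⟨rfl, rfl⟩ := hc
      simp
    · rw [if_neg h] at hc
      cases hq : pvCuts (p + pvDelta t) l with
      | nil => rw [hq] at hc; simp at hc
      | cons c' cs' =>
        rw [hq] at hc
        simp only [List.map_cons, List.cons.injEq] at hc
        obtain ⟨rfl, rfl⟩ := hc
        have hb := pv_cuts_bound l (p + pvDelta t) c' (by rw [hq]; exact List.mem_cons_self ..)
        have ht : (c' + 1).toNat = c'.toNat + 1 := by omega
        rw [ih _ _ _ hq, ht]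
        simp only [List.drop_succ_cons]
        rw [pv_map_add_add]

-- A side
theorem pv_foldA_filter (wf : List String) : ∀ st,
    wf.foldl pvStepA st = (wf.filter (fun t => !pvUpperFirst t)).foldl pvStepA st := by
  induction wf with
  | nil => intro st; rfl
  | cons t wf ih =>
    intro st
    by_cases h : pvUpperFirst t
    · have hst : pvStepA st t = st := by simp [pvStepA, h]
      simp [h, List.foldl_cons, hst, ih]
    · simp [h, List.foldl_cons, ih]

def pvFinalize (st : List (List String) × List String × Int) : List (List String) :=
  if st.2.1.length ≠ 0 then st.1 ++ [st.2.1] else st.1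

theorem pv_foldA_gns (l : List String) : ∀ (res : List (List String)) (arg : List String) (p : Int),
    (∀ t ∈ l, pvUpperFirst t = false) →
    pvFinalize (l.foldl pvStepA (res, arg, p)) = res ++ pvGns arg p l := by
  induction l with
  | nil =>
    intro res arg p _
    cases arg <;> simp [pvFinalize, pvGns]
  | cons t l ih =>
    intro res arg p hkeep
    have hk : pvUpperFirst t = false := hkeep t (List.mem_cons_self ..)
    have hrest : ∀ x ∈ l, pvUpperFirst x = false := fun x hx => hkeep x (List.mem_cons_of_mem _ hx)
    have hpar : (if t = "(" then p + 1 else if t = ")" then p - 1 else p) = p + pvDelta t := by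
      simp only [pvDelta]; split_ifs <;> ring
    simp only [List.foldl_cons, pvStepA, hk, Bool.false_eq_true, if_false, hpar]
    by_cases h0 : p + pvDelta t = 0
    · rw [h0]
      simp only [reduceIte]
      rw [ih _ _ _ hrest]
      simp [pvGns, h0, List.append_assoc]
    · simp only [if_neg h0]
      rw [ih _ _ _ hrest]
      simp [pvGns, h0]

theorem pv_gns_decomp (l : List String) : ∀ (arg : List String) (p : Int),
    pvGns arg p l =
      match pvCuts p l with
      | [] => if arg ++ l = [] then [] else [arg ++ l]
      | c :: _ => (arg ++ l.take c.toNat) :: pvGns [] 0 (l.drop c.toNat) := by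
  induction l with
  | nil => intro arg p; simp [pvGns, pvCuts]
  | cons t l ih =>
    intro arg p
    by_cases h : p + pvDelta t = 0
    · simp only [pvGns, pvCuts, if_pos h]
      have h1 : (1 : Int).toNat = 1 := rfl
      simp
    · simp only [pvGns, pvCuts, if_neg h]
      rw [ih (arg ++ [t]) (p + pvDelta t)]
      cases hq : pvCuts (p + pvDelta t) l with
      | nil => simp
      | cons c' cs' =>
        have hb := pv_cuts_bound l (p + pvDelta t) c' (by rw [hq]; exact List.mem_cons_self ..)
        have ht : (c' + 1).toNat = c'.toNat + 1 := by omega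
        have ht' : c'.toNat = c'.toNat - 1 + 1 := by omega
        simp only [List.map_cons, ht, List.take_succ_cons, List.drop_succ_cons, List.append_assoc, List.singleton_append]

-- pvPipe rewritten through pvCuts
def pvLast (l : List String) : Int := ((pvCuts 0 l).getLast?).getD 0

def pvPipeC (l : List String) : List (List String) :=
  (List.zip ((0 : Int) :: pvCuts 0 l) (pvCuts 0 l)).map
      (fun q => PySem.List.slice l (some q.1) (some q.2))
    ++ (if pvLast l < (l.length : Int) then [PySem.List.slice l (some (pvLast l)) none] else [])

theorem pv_pipe_eq_pipeC (l : List String) : pvPipe l = pvPipeC l := by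
  simp only [pvPipe, pvPipeC, pvLast]
  rw [pv_foldl_depths, pv_cuts_enum]
  simp only [List.nil_append]
  rw [pv_cutsAt_cumsum]
  rw [PySem.List.pyGet?_neg_one]
  cases hq : (pvCuts 0 l).getLast? with
  | none => simp only [Option.getD_none]; split <;> simp
  | some c => simp only [Option.getD_some]; split <;> simp

theorem pv_slice_shift (l : List String) (c a b : Int)
    (hc : 0 ≤ c) (ha : 0 ≤ a) (hb : 0 ≤ b) :
    PySem.List.slice l (some (a + c)) (some (b + c))
      = PySem.List.slice (l.drop c.toNat) (some a) (some b) := by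
  rw [PySem.List.slice_toNat l (by omega) (by omega),
      PySem.List.slice_toNat (l.drop c.toNat) ha hb]
  rw [List.drop_drop]
  have h1 : (a + c).toNat = a.toNat + c.toNat := by omega
  rw [h1]
  have h2 : (b + c).toNat - (a.toNat + c.toNat) = b.toNat - a.toNat := by omega
  have h3 : a.toNat + c.toNat = c.toNat + a.toNat := by omega
  rw [h2, h3]

theorem pv_pipe_decomp_nil (l : List String) (h : pvCuts 0 l = []) :
    pvPipe l = if l = [] then [] else [l] := by
  rw [pv_pipe_eq_pipeC]
  simp only [pvPipeC, pvLast, h, List.zip_nil_right, List.map_nil, List.getLast?_nil,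
    Option.getD_none, List.nil_append]
  cases l with
  | nil => simp
  | cons x xs =>
    rw [if_pos (by simp only [List.length_cons]; push_cast; omega), if_neg (by simp)]
    rw [PySem.List.slice_zero_start, PySem.List.slice_none_none]

theorem pv_pipe_decomp_cons (l : List String) (c : Int) (cs : List Int)
    (h : pvCuts 0 l = c :: cs) :
    pvPipe l = l.take c.toNat :: pvPipe (l.drop c.toNat) := by
  have hb := pv_cuts_bound l 0 c (by rw [h]; exact List.mem_cons_self ..)
  have hcs := pv_cuts_decomp l 0 c cs h
  rw [pv_pipe_eq_pipeC, pv_pipe_eq_pipeC]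
  have hlen' : ((l.drop c.toNat).length : Int) = (l.length : Int) - c := by
    rw [List.length_drop]; omega
  set l' := l.drop c.toNat with hld
  have hX : ∀ x ∈ pvCuts 0 l', 1 ≤ x ∧ x ≤ (l'.length : Int) := pv_cuts_bound l' 0
  -- heads and zip structure
  have hzip : List.zip ((0 : Int) :: c :: cs) (c :: cs)
      = (0, c) :: (List.zip ((0 : Int) :: pvCuts 0 l') (pvCuts 0 l')).map
          (fun q => (q.1 + c, q.2 + c)) := by
    rw [hcs]
    have : (c :: (pvCuts 0 l').map (· + c)) = ((0 : Int) :: pvCuts 0 l').map (· + c) := by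
      simp
    rw [List.zip_cons_cons, this, List.zip_map]
    simp [Prod.map]
  -- last for l in terms of last for l'
  have hmapLast : ∀ (f : Int → Int) (X : List Int), (X.map f).getLast? = (X.getLast?).map f := by
    intro f X
    rw [List.getLast?_eq_head?_reverse, ← List.map_reverse, List.head?_map,
      ← List.getLast?_eq_head?_reverse]
  have hlast : pvLast l = pvLast l' + c := by
    simp only [pvLast, h, hcs]
    cases hq : pvCuts 0 l' with
    | nil => simp
    | cons y ys =>
      rw [List.map_cons, List.getLast?_cons_cons]
      have hcons : ((y + c) :: List.map (fun x => x + c) ys) = (y :: ys).map (fun x => x + c) := by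
        simp
      rw [hcons, hmapLast]
      simp [List.getLast?_cons]
  have hlast0 : 0 ≤ pvLast l' := by
    simp only [pvLast]
    cases hg : (pvCuts 0 l').getLast? with
    | none => simp
    | some z =>
      have hz := hX z (List.mem_of_getLast? hg)
      simp
      omega
  have hcond : (pvLast l < (l.length : Int)) ↔ (pvLast l' < (l'.length : Int)) := by
    rw [hlast, hlen']; omega
  have hhead : PySem.List.slice l (some (0 : Int)) (some c) = l.take c.toNat := by
    rw [PySem.List.slice_zero_start, PySem.List.slice_to l (by omega)]
  have hmid : ∀ q ∈ List.zip ((0 : Int) :: pvCuts 0 l') (pvCuts 0 l'),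
      ((fun q : Int × Int => PySem.List.slice l (some q.1) (some q.2)) ∘
        (fun q : Int × Int => (q.1 + c, q.2 + c))) q
        = PySem.List.slice l' (some q.1) (some q.2) := by
    intro q hq
    have hq1 : q.1 ∈ (0 : Int) :: pvCuts 0 l' := (List.of_mem_zip hq).1
    have hq2 : q.2 ∈ pvCuts 0 l' := (List.of_mem_zip hq).2
    have hq10 : 0 ≤ q.1 := by
      rcases List.mem_cons.1 hq1 with h1 | h1
      · omega
      · exact le_trans (by omega) (hX _ h1).1
    have hq20 : 0 ≤ q.2 := le_trans (by omega) (hX _ hq2).1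
    simp only [Function.comp]
    exact pv_slice_shift l c q.1 q.2 (by omega) hq10 hq20
  have htail : (if pvLast l < (l.length : Int) then [PySem.List.slice l (some (pvLast l)) none] else [])
      = (if pvLast l' < (l'.length : Int) then [PySem.List.slice l' (some (pvLast l')) none] else []) := by
    by_cases hcnd : pvLast l' < (l'.length : Int)
    · rw [if_pos (hcond.2 hcnd), if_pos hcnd, hlast]
      rw [PySem.List.slice_from l (by omega), PySem.List.slice_from l' hlast0]
      have hdd : ∀ k : Nat, List.drop k l' = List.drop (c.toNat + k) l := by
        intro k
        rw [hld, List.drop_drop]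
      rw [hdd]
      have hk : (pvLast l' + c).toNat = c.toNat + (pvLast l').toNat := by omega
      rw [hk]
    · rw [if_neg (fun hx => hcnd (hcond.1 hx)), if_neg hcnd]
  simp only [pvPipeC, h, hzip, List.map_cons, List.map_map]
  rw [List.map_congr_left hmid, hhead, htail]
  rfl

theorem pv_pipe_eq_gns : ∀ (n : Nat) (l : List String), l.length ≤ n →
    pvPipe l = pvGns [] 0 l := by
  intro n
  induction n with
  | zero =>
    intro l hl
    have : l = [] := List.eq_nil_of_length_eq_zero (Nat.le_zero.1 hl)
    subst this
    rw [pv_pipe_decomp_nil [] rfl]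
    simp [pvGns]
  | succ n ih =>
    intro l hl
    rw [pv_gns_decomp]
    cases hc : pvCuts 0 l with
    | nil =>
      rw [pv_pipe_decomp_nil l hc]
      cases l <;> simp
    | cons c cs =>
      have hb := pv_cuts_bound l 0 c (by rw [hc]; exact List.mem_cons_self ..)
      rw [pv_pipe_decomp_cons l c cs hc]
      have hlt : (l.drop c.toNat).length ≤ n := by
        rw [List.length_drop]
        have : 1 ≤ c.toNat := by omega
        have hlen : 1 ≤ l.length := by
          by_contra hx
          have : l.length = 0 := by omega
          omega
        omega
      rw [ih _ hlt]
      simp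

-- ===== VERDICT (by name: the statement is the Claim_ definition above) =====
theorem get_wf_args_spec : Claim_equal_get_wf_args := by
  intro wf _ _
  unfold Spec_get_wf_args
  have hkeep : ∀ t ∈ wf.filter (fun t => !pvUpperFirst t), pvUpperFirst t = false := by
    intro t ht
    simpa using List.of_mem_filter ht
  have hstep : get_wf_args wf
      = pvFinalize ((wf.filter (fun t => !pvUpperFirst t)).foldl pvStepA ([], [], 0)) := by
    unfold get_wf_args pvFinalize
    rw [pv_foldA_filter]
  rw [hstep, pv_foldA_gns _ _ _ _ hkeep]
  unfold get_wf_args_alt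
  rw [pv_pipe_eq_gns (wf.filter (fun t => !pvUpperFirst t)).length _ le_rfl]
  simp
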